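-- pv_equiv track=rewrite | github.com/shtylenko-meta/rubik-emulator7 | rubiks_starter.py | encode_eslice
-- ===== SOURCE A (Python) =====
-- from typing import Dict, List, Tuple, Optional, Set, Any
--
-- def encode_eslice(ep: List[int]) -> int:
--     """Encode the permutation of slice edges (positions 8-11). Range: 0..23."""
--     sub = [ep[i] - 8 for i in range(8, 12)]  # normalize to 0-3
--     n = 0
--     for i in range(4):
--         count = 0
--         for j in range(i + 1, 4):
--             if sub[j] < sub[i]:
--                 count += 1
--         n = n * (4 - i) + count
--     return n
-- ===== SOURCE B (Python) =====
-- def encode_eslice(ep):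
--     """Encode the permutation of slice edges (positions 8-11). Range: 0..23."""
--     sub = [ep[i] - 8 for i in range(8, 12)]
--     avail = sorted(sub)
--     n = 0
--     for i in range(4):
--         idx = avail.index(sub[i])
--         n = n * (4 - i) + idx
--         avail.pop(idx)
--     return n
-- ===== Notes on version B (the rewrite author's own statement) =====
-- stated objective: alternative
-- what changed: Replaces the nested inversion-counting scan (for each position, re-scan the suffix for smaller elements) with a sort-once-then-shrink scheme: build sorted(sub) up front, and each digit is the element's index in the shrinking sorted availability list, popped after use.
import Mathlib
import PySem

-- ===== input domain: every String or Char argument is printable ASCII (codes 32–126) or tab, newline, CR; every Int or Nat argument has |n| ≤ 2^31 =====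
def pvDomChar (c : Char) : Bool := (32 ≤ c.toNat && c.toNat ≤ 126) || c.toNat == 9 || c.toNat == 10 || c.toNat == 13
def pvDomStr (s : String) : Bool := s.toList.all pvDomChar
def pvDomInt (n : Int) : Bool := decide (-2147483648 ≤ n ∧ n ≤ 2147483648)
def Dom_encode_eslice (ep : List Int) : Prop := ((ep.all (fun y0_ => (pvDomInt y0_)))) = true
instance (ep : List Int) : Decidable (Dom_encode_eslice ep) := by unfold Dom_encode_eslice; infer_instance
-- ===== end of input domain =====

-- B replaces A's nested inversion-counting scans with a sort-once scheme: each Lehmer digit is the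
-- element's index in a shrinking sorted availability list (alternative structure, same cost).


-- ===== PORT A =====
-- sub = [ep[i] - 8 for i in range(8, 12)]  (identical first line of A and B)
def pvSub (ep : List Int) : List Int :=
  (PySem.List.pyRange 8 12 1).map (fun i => PySem.List.pyGetD ep i 0 - 8)

-- A's loop: for i in range(4): count = #(j in i+1..3 with sub[j] < sub[i]); n = n*(4-i)+count
def pvLoopA (sub : List Int) : Int :=
  (PySem.List.pyRange 0 4 1).foldl (fun n i =>
    let count := (PySem.List.pyRange (i + 1) 4 1).foldl (fun c j =>
      if PySem.List.pyGetD sub j 0 < PySem.List.pyGetD sub i 0 then c + 1 else c) (0 : Int)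
    n * (4 - i) + count) 0

def encode_eslice (ep : List Int) : Int := pvLoopA (pvSub ep)

-- ===== PORT B =====
-- one B iteration: idx = avail.index(sub[i]); n = n*(4-i)+idx; avail.pop(idx)
-- (.index / .pop always succeed because avail is a permutation of sub's suffix, so getD is never taken)
def pvStepB (sub : List Int) (st : Int × List Int) (i : Int) : Int × List Int :=
  let idx : Nat := (PySem.List.index? st.2 (PySem.List.pyGetD sub i 0)).getD 0
  let n := st.1 * (4 - i) + (idx : Int)
  let avail := ((PySem.List.pop? st.2 (idx : Int)).map (·.2)).getD st.2
  (n, avail)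

-- B's loop: avail = sorted(sub); fold the step over range(4)
def pvLoopB (sub : List Int) : Int :=
  ((PySem.List.pyRange 0 4 1).foldl (pvStepB sub)
    (0, PySem.List.sorted sub (fun x => x) false)).1

def encode_eslice_alt (ep : List Int) : Int := pvLoopB (pvSub ep)

-- ===== PRECONDITION & SPEC =====
-- Python A indexes positions 8 through 11 of ep; it raises IndexError exactly when the list has fewer than 12 elements.
def Pre_encode_eslice (ep : List Int) : Prop := 12 ≤ ep.length
instance (ep : List Int) : Decidable (Pre_encode_eslice ep) := by unfold Pre_encode_eslice; infer_instance
def pvWitness_encode_eslice : List Int := [0, 1, 2, 3, 4, 5, 6, 7, 9, 8, 11, 10]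

def Spec_encode_eslice (ep : List Int) (out : Int) : Prop := out = encode_eslice_alt ep
instance (ep : List Int) (out : Int) : Decidable (Spec_encode_eslice ep out) := by unfold Spec_encode_eslice; infer_instance

-- ===== CLAIM (what is proved, stated in full; the proofs are below) =====
def Claim_equal_encode_eslice : Prop := ∀ (ep : List Int), Dom_encode_eslice ep → Pre_encode_eslice ep → Spec_encode_eslice ep (encode_eslice ep)

-- ===== LEMMAS AND PROOFS =====

-- the index of the first occurrence of v in a (≤)-sorted list = number of strictly smaller elements
theorem index_sorted_eq_countP (s : List Int) (v : Int)
    (hs : s.Pairwise (· ≤ ·)) (hv : v ∈ s) :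
    PySem.List.index? s v = some (s.countP (fun x => decide (x < v))) := by
  induction s with
  | nil => cases hv
  | cons h t ih =>
    rcases List.pairwise_cons.mp hs with ⟨hle, ht⟩
    by_cases hveq : h = v
    · subst hveq
      have h0 : t.countP (fun x => decide (x < h)) = 0 := by
        apply List.countP_eq_zero.mpr
        intro x hx
        simp [not_lt.mpr (hle x hx)]
      rw [PySem.List.index?_cons_self]
      simp [h0]
    · have hvt : v ∈ t := by
        rcases List.mem_cons.mp hv with h' | h'
        · exact absurd h'.symm hveq
        · exact h'
      rw [PySem.List.index?_cons_of_ne t hveq, ih ht hvt]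
      have hlt : h < v := lt_of_le_of_ne (hle v hvt) hveq
      simp [hlt]

-- popping at the index found by .index removes exactly the first occurrence (= List.erase)
theorem erase_of_index (s : List Int) (v : Int) (k : Nat)
    (h : PySem.List.index? s v = some k) :
    k < s.length ∧ s.eraseIdx k = s.erase v := by
  rcases (PySem.List.index?_eq_some_iff s v k).mp h with ⟨pre, suf, rfl, rfl, hnot⟩
  refine ⟨by simp, ?_⟩
  rw [List.eraseIdx_append_of_length_le (le_refl _), List.erase_append_right _ hnot]
  simp

-- one B iteration on a sorted availability list containing the looked-up value
theorem pvStepB_eq (sub s : List Int) (n i : Int)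
    (hs : s.Pairwise (· ≤ ·)) (hv : PySem.List.pyGetD sub i 0 ∈ s) :
    pvStepB sub (n, s) i =
      (n * (4 - i) + (s.countP (fun x => decide (x < PySem.List.pyGetD sub i 0)) : Int),
       s.erase (PySem.List.pyGetD sub i 0)) := by
  have hidx := index_sorted_eq_countP s _ hs hv
  obtain ⟨hk, he⟩ := erase_of_index s _ _ hidx
  unfold pvStepB
  rw [hidx]
  simp only [Option.getD_some]
  rw [PySem.List.pop?_natCast s _ hk]
  simp [he]

-- the two loops agree on every 4-element normalized list
set_option maxHeartbeats 1000000 in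
theorem pvLoop_eq (a b c d : Int) : pvLoopB [a, b, c, d] = pvLoopA [a, b, c, d] := by
  have hR : PySem.List.pyRange 0 4 1 = [0, 1, 2, 3] := by decide
  have g0 : PySem.List.pyGetD [a, b, c, d] 0 0 = a := rfl
  have g1 : PySem.List.pyGetD [a, b, c, d] 1 0 = b := rfl
  have g2 : PySem.List.pyGetD [a, b, c, d] 2 0 = c := rfl
  have g3 : PySem.List.pyGetD [a, b, c, d] 3 0 = d := rfl
  have hp0 : (PySem.List.sorted [a, b, c, d] (fun x => x) false).Pairwise (· ≤ ·) :=
    PySem.List.sorted_pairwise [a, b, c, d] (fun x => x)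
  have perm0 : (PySem.List.sorted [a, b, c, d] (fun x => x) false).Perm [a, b, c, d] :=
    PySem.List.sorted_perm [a, b, c, d] (fun x => x) false
  set s0 := PySem.List.sorted [a, b, c, d] (fun x => x) false with hs0
  have hv0 : PySem.List.pyGetD [a, b, c, d] 0 0 ∈ s0 := by rw [g0, perm0.mem_iff]; simp
  have hp1 : (s0.erase a).Pairwise (· ≤ ·) := hp0.sublist (List.erase_sublist ..)
  have perm1 : (s0.erase a).Perm [b, c, d] := by
    have := perm0.erase a
    simpa using this
  have hv1 : PySem.List.pyGetD [a, b, c, d] 1 0 ∈ s0.erase a := by rw [g1, perm1.mem_iff]; simp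
  have hp2 : ((s0.erase a).erase b).Pairwise (· ≤ ·) := hp1.sublist (List.erase_sublist ..)
  have perm2 : ((s0.erase a).erase b).Perm [c, d] := by
    have := perm1.erase b
    simpa using this
  have hv2 : PySem.List.pyGetD [a, b, c, d] 2 0 ∈ (s0.erase a).erase b := by
    rw [g2, perm2.mem_iff]; simp
  have hp3 : (((s0.erase a).erase b).erase c).Pairwise (· ≤ ·) := hp2.sublist (List.erase_sublist ..)
  have perm3 : (((s0.erase a).erase b).erase c).Perm [d] := by
    have := perm2.erase c
    simpa using this
  have hv3 : PySem.List.pyGetD [a, b, c, d] 3 0 ∈ ((s0.erase a).erase b).erase c := by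
    rw [g3, perm3.mem_iff]; simp
  unfold pvLoopB pvLoopA
  rw [hR]
  simp only [List.foldl_cons, List.foldl_nil, ← hs0]
  rw [pvStepB_eq [a, b, c, d] s0 0 0 hp0 hv0]
  rw [g0]
  rw [pvStepB_eq [a, b, c, d] (s0.erase a) _ 1 hp1 hv1]
  rw [g1]
  rw [pvStepB_eq [a, b, c, d] ((s0.erase a).erase b) _ 2 hp2 hv2]
  rw [g2]
  rw [pvStepB_eq [a, b, c, d] (((s0.erase a).erase b).erase c) _ 3 hp3 hv3]
  rw [g3]
  rw [perm0.countP_eq (fun x => decide (x < a)), perm1.countP_eq (fun x => decide (x < b)),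
    perm2.countP_eq (fun x => decide (x < c)), perm3.countP_eq (fun x => decide (x < d))]
  have hA1 : PySem.List.pyRange (0 + 1) 4 1 = [1, 2, 3] := by decide
  have hA2 : PySem.List.pyRange (1 + 1) 4 1 = [2, 3] := by decide
  have hA3 : PySem.List.pyRange (2 + 1) 4 1 = [3] := by decide
  have hA4 : PySem.List.pyRange (3 + 1) 4 1 = [] := by decide
  simp only [hA1, hA2, hA3, hA4, List.foldl_cons, List.foldl_nil, g0, g1, g2, g3,
    List.countP_cons, List.countP_nil]
  simp only [lt_self_iff_false, decide_false, Bool.false_eq_true, if_false, decide_eq_true_eq,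
    add_zero, zero_add]
  split_ifs <;> push_cast <;> ring

-- pvSub always yields a 4-element literal list
theorem pvSub_eq (ep : List Int) :
    pvSub ep = [PySem.List.pyGetD ep 8 0 - 8, PySem.List.pyGetD ep 9 0 - 8,
      PySem.List.pyGetD ep 10 0 - 8, PySem.List.pyGetD ep 11 0 - 8] := by
  have h : PySem.List.pyRange 8 12 1 = [8, 9, 10, 11] := by decide
  simp [pvSub, h]

-- ===== VERDICT (by name: the statement is the Claim_ definition above) =====
theorem encode_eslice_spec : Claim_equal_encode_eslice := by
  intro ep _ _
  unfold Spec_encode_eslice encode_eslice encode_eslice_alt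
  rw [pvSub_eq ep]
  exact (pvLoop_eq _ _ _ _).symm
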